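-- pv_equiv track=rewrite | github.com/Liubuggg/mutiAgentTrain | pathfinding/models/dhc/agent.py | _check_horizontal_oscillation
-- ===== SOURCE A (Python) =====
-- def _check_horizontal_oscillation(positions):
--     """检查是否存在水平震荡（左右来回移动）
--
--     Args:
--         positions: 位置历史
--
--     Returns:
--         bool: 是否存在水平震荡
--     """
--     if len(positions) < 4:
--         return False
--
--     # 提取横坐标变化
--     x_changes = []
--     for i in range(1, len(positions)):
--         x_change = positions[i][0] - positions[i-1][0]
--         if x_change != 0:  # 只关注水平方向的变化
--             x_changes.append(x_change)
--
--     # 至少需要2个水平方向的变化才能判断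
--     if len(x_changes) < 2:
--         return False
--
--     # 检查最近的水平变化是否呈现震荡（正负交替）
--     for i in range(1, len(x_changes)):
--         if x_changes[i] * x_changes[i-1] < 0:  # 符号相反，说明方向反转
--             return True
--
--     return False
-- ===== SOURCE B (Python) =====
-- def _check_horizontal_oscillation(positions):
--     if len(positions) < 4:
--         return False
--     prev = None
--     for cur, nxt in zip(positions, positions[1:]):
--         dx = nxt[0] - cur[0]
--         if dx == 0:
--             continue
--         if prev is not None and dx * prev < 0:
--             return True
--         prev = dx
--     return False
-- ===== Notes on version B (the rewrite author's own statement) =====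
-- stated objective: simpler
-- what changed: Replaces A's two phases (build an x_changes list, then scan adjacent pairs of it) with a single pass over consecutive positions that carries the last nonzero x-delta and returns True on the first sign reversal; the intermediate list and the len(x_changes)<2 check disappear.
import Mathlib
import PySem

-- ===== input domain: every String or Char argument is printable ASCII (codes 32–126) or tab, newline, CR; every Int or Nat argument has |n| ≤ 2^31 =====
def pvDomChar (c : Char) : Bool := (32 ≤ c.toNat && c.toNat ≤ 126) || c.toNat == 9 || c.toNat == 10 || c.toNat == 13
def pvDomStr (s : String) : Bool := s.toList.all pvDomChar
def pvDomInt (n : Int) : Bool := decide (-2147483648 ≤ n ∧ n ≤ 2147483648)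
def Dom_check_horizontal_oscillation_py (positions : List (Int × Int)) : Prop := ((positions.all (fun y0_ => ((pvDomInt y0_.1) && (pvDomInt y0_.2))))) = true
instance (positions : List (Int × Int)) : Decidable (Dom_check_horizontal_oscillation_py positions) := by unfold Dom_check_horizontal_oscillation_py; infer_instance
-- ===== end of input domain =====

-- ===== PORT A =====
-- Header: B fuses A's two phases (delta-list build + adjacent-product scan) into one pass; objective: simpler.
-- pvXChanges: the loop 'for i in range(1,len): ... append nonzero delta'
def pvXChanges : List (Int × Int) → List Int
  | a :: b :: rest =>
    let d := b.1 - a.1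
    if d ≠ 0 then d :: pvXChanges (b :: rest) else pvXChanges (b :: rest)
  | _ => []

-- pvHasReversal: the loop 'for i in range(1,len(x_changes)): if x_changes[i]*x_changes[i-1] < 0: return True'
def pvHasReversal : List Int → Bool
  | a :: b :: rest => if b * a < 0 then true else pvHasReversal (b :: rest)
  | _ => false

def check_horizontal_oscillation_py (positions : List (Int × Int)) : Bool :=
  if positions.length < 4 then false
  else
    let xc := pvXChanges positions
    if xc.length < 2 then false
    else pvHasReversal xc

-- ===== PORT B =====
-- pvScan: B's single loop; prev carries the last nonzero x-delta
def pvScan : Option Int → List (Int × Int) → Bool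
  | prev, a :: b :: rest =>
    let d := b.1 - a.1
    if d = 0 then pvScan prev (b :: rest)
    else
      match prev with
      | some p => if d * p < 0 then true else pvScan (some d) (b :: rest)
      | none => pvScan (some d) (b :: rest)
  | _, _ => false

def check_horizontal_oscillation_py_alt (positions : List (Int × Int)) : Bool :=
  if positions.length < 4 then false
  else pvScan none positions

-- ===== PRECONDITION & SPEC =====
def Spec_check_horizontal_oscillation_py (positions : List (Int × Int)) (out : Bool) : Prop := out = check_horizontal_oscillation_py_alt positions
instance (positions : List (Int × Int)) (out : Bool) : Decidable (Spec_check_horizontal_oscillation_py positions out) := by unfold Spec_check_horizontal_oscillation_py; infer_instance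

-- ===== CLAIM (what is proved, stated in full; the proofs are below) =====
def Claim_equal_check_horizontal_oscillation_py : Prop := ∀ (positions : List (Int × Int)), Dom_check_horizontal_oscillation_py positions → Spec_check_horizontal_oscillation_py positions (check_horizontal_oscillation_py positions)

-- ===== LEMMAS AND PROOFS =====
-- pvRev2: pvHasReversal generalized over a carried previous delta
def pvRev2 : Option Int → List Int → Bool
  | some p, d :: rest => if d * p < 0 then true else pvRev2 (some d) rest
  | none, d :: rest => pvRev2 (some d) rest
  | _, [] => false

theorem pvRev2_none (l : List Int) : pvRev2 none l = pvHasReversal l := by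
  match l with
  | [] => rfl
  | a :: rest =>
    show pvRev2 (some a) rest = pvHasReversal (a :: rest)
    induction rest generalizing a with
    | nil => rfl
    | cons b rest ih =>
      show (if b * a < 0 then true else pvRev2 (some b) rest) = _
      rw [ih b]
      rfl

theorem pvScan_eq (ps : List (Int × Int)) (prev : Option Int) :
    pvScan prev ps = pvRev2 prev (pvXChanges ps) := by
  induction ps generalizing prev with
  | nil => cases prev <;> rfl
  | cons a ps ih =>
    cases ps with
    | nil => cases prev <;> rfl
    | cons b rest =>
      simp only [pvScan, pvXChanges]
      by_cases h : b.1 - a.1 = 0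
      · simp [h, ih]
      · cases prev with
        | none => simp [h, ih, pvRev2]
        | some p =>
          simp only [h, if_neg h, ite_not, if_neg h]
          by_cases h2 : (b.1 - a.1) * p < 0 <;> simp [h2, ih, pvRev2]

theorem pvHasReversal_short (l : List Int) (h : l.length < 2) : pvHasReversal l = false := by
  match l with
  | [] => rfl
  | [a] => rfl
  | a :: b :: r => simp at h


-- ===== VERDICT (by name: the statement is the Claim_ definition above) =====
theorem check_horizontal_oscillation_py_spec : Claim_equal_check_horizontal_oscillation_py := by
  intro positions _
  unfold Spec_check_horizontal_oscillation_py check_horizontal_oscillation_py check_horizontal_oscillation_py_alt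
  by_cases h4 : positions.length < 4
  · simp [h4]
  · simp only [h4, if_neg h4, if_false]
    rw [pvScan_eq, pvRev2_none]
    by_cases h2 : (pvXChanges positions).length < 2
    · simp [h2, pvHasReversal_short _ h2]
    · simp [h2]
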